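-- pv_equiv track=rewrite | github.com/sungju/isos | source/cmds/modules.py | translate_taint_val
-- ===== SOURCE A (Python) =====
-- def translate_taint_val(taint_val):
--     result_str = ''
--     bits_list = []
--     taint_meaning = {
--             0 : "P/G : TAINT_PROPRIETARY_MODULE",
--             1 : "F   : TAINT_FORCED_MODULE",
--             2 : "S   : TAINT_UNSAFE_SMP(4-7), TAINT_CPU_OUT_OF_SPEC(8-9)",
--             3 : "R   : TAINT_FORCED_RMMOD",
--             4 : "M   : TAINT_MACHINE_CHECK",
--             5 : "B   : TAINT_BAD_PAGE",
--             6 : "U   : TAINT_USER",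
--             7 : "D   : TAINT_DIE",
--             8 : "A   : TAINT_OVERRIDDEN_ACPI_TABLE",
--             9 : "W   : TAINT_WARN",
--             10: "C   : TAINT_CRAP",
--             11: "I   : TAINT_FIRMWARE_WORKARUND",
--             12: "O   : TAINT_OOT_MODULE",
--             13: "E   : TAINT_UNSIGNED_MODULE",
--             14: "L   : TAINT_SOFTLOCKUP",
--             15: "K   : TAINT_LIVEPATCH",
--             16: "X   : TAINT_AUX",
--             17: "T   : TAINT_RANDSTRUCT",
--             26: "P   : TAINT_PARTNER_SUPPORTED",
--             27: "h/r : TAINT_SUPPORT_REMOVED",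
--     }
--     idx = 0
--     while taint_val:
--         if (taint_val & 0x1) == 0x1:
--             bits_list.append("%d" % idx)
--             if idx in taint_meaning:
--                 result_str = result_str + taint_meaning[idx] + "\n"
--         idx = idx + 1
--         taint_val = taint_val >> 1
--
--     return result_str, ','.join(bits_list)
-- ===== SOURCE B (Python) =====
-- def translate_taint_val(taint_val):
--     taint_meaning = {
--             0 : "P/G : TAINT_PROPRIETARY_MODULE",
--             1 : "F   : TAINT_FORCED_MODULE",
--             2 : "S   : TAINT_UNSAFE_SMP(4-7), TAINT_CPU_OUT_OF_SPEC(8-9)",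
--             3 : "R   : TAINT_FORCED_RMMOD",
--             4 : "M   : TAINT_MACHINE_CHECK",
--             5 : "B   : TAINT_BAD_PAGE",
--             6 : "U   : TAINT_USER",
--             7 : "D   : TAINT_DIE",
--             8 : "A   : TAINT_OVERRIDDEN_ACPI_TABLE",
--             9 : "W   : TAINT_WARN",
--             10: "C   : TAINT_CRAP",
--             11: "I   : TAINT_FIRMWARE_WORKARUND",
--             12: "O   : TAINT_OOT_MODULE",
--             13: "E   : TAINT_UNSIGNED_MODULE",
--             14: "L   : TAINT_SOFTLOCKUP",
--             15: "K   : TAINT_LIVEPATCH",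
--             16: "X   : TAINT_AUX",
--             17: "T   : TAINT_RANDSTRUCT",
--             26: "P   : TAINT_PARTNER_SUPPORTED",
--             27: "h/r : TAINT_SUPPORT_REMOVED",
--     }
--     # Pass 1: driven by the fixed table, not by the bits -- pick out the
--     # descriptions whose bit is set (table keys are in increasing order).
--     result_str = ''.join(text + '\n'
--                          for bit, text in taint_meaning.items()
--                          if (taint_val >> bit) & 1)
--     # Pass 2: Kernighan lowest-set-bit extraction -- jump from set bit to
--     # set bit instead of scanning every position.
--     bits = []
--     n = taint_val
--     while n:
--         m = n & (n - 1)              # clear the lowest set bit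
--         bits.append(str((n ^ m).bit_length() - 1))
--         n = m
--     return result_str, ','.join(bits)
-- ===== Notes on version B (the rewrite author's own statement) =====
-- stated objective: alternative
-- what changed: Replaces A's single destructive shift-loop (which threads idx/result/bits state bit by bit) with two independent passes: the description string is built by iterating the fixed meaning table and testing each entry's bit, and the bit index list by Kernighan's n&(n-1) lowest-set-bit extraction that jumps directly between set bits.
import Mathlib
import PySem

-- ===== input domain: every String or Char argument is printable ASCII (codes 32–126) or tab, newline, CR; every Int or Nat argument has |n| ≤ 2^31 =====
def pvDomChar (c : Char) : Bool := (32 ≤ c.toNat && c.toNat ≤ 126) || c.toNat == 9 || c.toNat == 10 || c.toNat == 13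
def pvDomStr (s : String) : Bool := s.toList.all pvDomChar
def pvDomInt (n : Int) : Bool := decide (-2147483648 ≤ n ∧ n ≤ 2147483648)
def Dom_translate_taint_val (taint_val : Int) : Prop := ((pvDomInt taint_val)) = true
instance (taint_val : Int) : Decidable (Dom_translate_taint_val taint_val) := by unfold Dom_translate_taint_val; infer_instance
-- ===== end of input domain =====

-- B replaces A's single indexed shift-loop by two independent passes: the description string is
-- built by iterating the fixed meaning TABLE and testing each entry's bit, and the bit list by
-- Kernighan lowest-set-bit extraction (n & (n-1)); objective: alternative algorithm, same cost.

-- ===== PORT A =====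
-- the taint_meaning dict literal (shared by both Pythons)
def pvTaintMeaning : PySem.Dict Int String := PySem.Dict.ofList [
  (0, "P/G : TAINT_PROPRIETARY_MODULE"),
  (1, "F   : TAINT_FORCED_MODULE"),
  (2, "S   : TAINT_UNSAFE_SMP(4-7), TAINT_CPU_OUT_OF_SPEC(8-9)"),
  (3, "R   : TAINT_FORCED_RMMOD"),
  (4, "M   : TAINT_MACHINE_CHECK"),
  (5, "B   : TAINT_BAD_PAGE"),
  (6, "U   : TAINT_USER"),
  (7, "D   : TAINT_DIE"),
  (8, "A   : TAINT_OVERRIDDEN_ACPI_TABLE"),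
  (9, "W   : TAINT_WARN"),
  (10, "C   : TAINT_CRAP"),
  (11, "I   : TAINT_FIRMWARE_WORKARUND"),
  (12, "O   : TAINT_OOT_MODULE"),
  (13, "E   : TAINT_UNSIGNED_MODULE"),
  (14, "L   : TAINT_SOFTLOCKUP"),
  (15, "K   : TAINT_LIVEPATCH"),
  (16, "X   : TAINT_AUX"),
  (17, "T   : TAINT_RANDSTRUCT"),
  (26, "P   : TAINT_PARTNER_SUPPORTED"),
  (27, "h/r : TAINT_SUPPORT_REMOVED")]

-- A's 'while taint_val:' loop; the '0 < tv' guard is a totality guard only: on negative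
-- inputs (excluded by Pre_) the Python loop never terminates, so nothing is claimed there.
def pvLoopA (tv idx : Int) (res : String) (bits : List String) : String × List String :=
  if _h : 0 < tv then
    pvLoopA (tv >>> (1 : Nat)) (idx + 1)
      (if PySem.Int.band tv 1 = 1 then
        (match pvTaintMeaning.get? idx with
         | some m => res ++ m ++ "\n"
         | none => res)
       else res)
      (if PySem.Int.band tv 1 = 1 then bits ++ [PySem.Int.toStr idx] else bits)
  else (res, bits)
termination_by tv.toNat
decreasing_by
  have : tv >>> (1 : Nat) = tv / 2 := by simp [Int.shiftRight_eq_div_pow]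
  rw [this]; omega

def translate_taint_val (taint_val : Int) : String × String :=
  let r := pvLoopA taint_val 0 "" []
  (r.1, PySem.Str.join "," r.2)

-- ===== PORT B =====
-- B's 'while n:' Kernighan loop (n &= n-1 clears the lowest set bit); same totality guard as A's
-- loop: on negative inputs (excluded by Pre_) the Python loop never terminates.
def pvLoopB (n : Int) (bits : List String) : List String :=
  if _h : 0 < n then
    pvLoopB (PySem.Int.band n (n - 1))
      (bits ++ [PySem.Int.toStr
        ((PySem.Int.bitLength (PySem.Int.bxor n (PySem.Int.band n (n - 1))) : Int) - 1)])
  else bits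
termination_by n.toNat
decreasing_by
  have e1 : ((n.toNat : Nat) : Int) = n := by omega
  have e2 : ((n.toNat - 1 : Nat) : Int) = n - 1 := by omega
  have hk := PySem.Int.band_natCast n.toNat (n.toNat - 1)
  rw [e1, e2] at hk
  rw [hk]
  have h1 : n.toNat &&& (n.toNat - 1) ≤ n.toNat - 1 := Nat.and_le_right
  simp only [Int.toNat_natCast]
  omega

def translate_taint_val_alt (taint_val : Int) : String × String :=
  let result_str := PySem.Str.join ""
    ((pvTaintMeaning.items).filterMap (fun p =>
      if PySem.Int.band (taint_val >>> p.1.toNat) 1 = 1 then some (p.2 ++ "\n") else none))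
  (result_str, PySem.Str.join "," (pvLoopB taint_val []))

-- ===== PRECONDITION & SPEC =====
-- Pre_ excludes negative masks: there Python A's 'while taint_val:' loop condition never
-- becomes false under '>>', so A loops forever and returns nothing; real masks are non-negative.
def Pre_translate_taint_val (taint_val : Int) : Prop := 0 ≤ taint_val
instance (taint_val : Int) : Decidable (Pre_translate_taint_val taint_val) := by
  unfold Pre_translate_taint_val; infer_instance

def pvWitness_translate_taint_val : Int := 577

def Spec_translate_taint_val (taint_val : Int) (out : String × String) : Prop := out = translate_taint_val_alt taint_val
instance (taint_val : Int) (out : String × String) : Decidable (Spec_translate_taint_val taint_val out) := by unfold Spec_translate_taint_val; infer_instance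

-- ===== CLAIM (what is proved, stated in full; the proofs are below) =====
def Claim_equal_translate_taint_val : Prop := ∀ (taint_val : Int), Dom_translate_taint_val taint_val → Pre_translate_taint_val taint_val → Spec_translate_taint_val taint_val (translate_taint_val taint_val)

-- ===== LEMMAS AND PROOFS =====

-- the set-bit positions of a Nat, least significant first
def pvPos (n : Nat) : List Nat :=
  if h : n = 0 then [] else
    (if n % 2 = 1 then [0] else []) ++ (pvPos (n / 2)).map (· + 1)
termination_by n
decreasing_by omega

-- the line A appends for bit position j (empty when j is not in the dict)
def pvLine (j : Int) : String :=
  match pvTaintMeaning.get? j with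
  | some m => m ++ "\n"
  | none => ""

theorem pvJoin_empty_cons (x : String) (xs : List String) :
    PySem.Str.join "" (x :: xs) = x ++ PySem.Str.join "" xs := by
  have h : ∀ (a : List Char) (l : List (List Char)),
      [].intercalate (a :: l) = a ++ [].intercalate l := by
    intro a l
    induction l with
    | nil => simp [List.intercalate]
    | cons b t ih => simp [List.intercalate, List.intersperse] at ih ⊢
  simp [PySem.Str.join, PySem.Chars.join, h, String.ofList_append]

theorem pvMatch_eq (j : Int) (res : String) :
    (match pvTaintMeaning.get? j with
     | some m => res ++ m ++ "\n"
     | none => res) = res ++ pvLine j := by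
  unfold pvLine
  cases h : pvTaintMeaning.get? j with
  | none => simp
  | some m => simp [String.append_assoc]

theorem pvShift_natCast (n k : Nat) : ((n : Int) >>> k) = ((n >>> k : Nat) : Int) := by
  simp [Int.shiftRight_eq_div_pow, Nat.shiftRight_eq_div_pow]

theorem pvBand_one (m : Nat) : (PySem.Int.band (m : Int) 1 = 1) ↔ m % 2 = 1 := by
  have hb := PySem.Int.band_natCast m 1
  norm_num at hb
  rw [hb]; omega

theorem pvLoopA_spec (n : Nat) : ∀ (idx : Int) (res : String) (bits : List String),
    pvLoopA (n : Int) idx res bits =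
      (res ++ PySem.Str.join "" ((pvPos n).map (fun (k : Nat) => pvLine (idx + (k : Int)))),
       bits ++ (pvPos n).map (fun (k : Nat) => PySem.Int.toStr (idx + (k : Int)))) := by
  induction n using Nat.strong_induction_on with
  | _ n IH =>
    intro idx res bits
    rw [pvLoopA]
    by_cases h0 : n = 0
    · subst h0
      rw [pvPos]
      simp [PySem.Str.join]
    · have hpos : (0 : Int) < (n : Int) := by exact_mod_cast Nat.pos_of_ne_zero h0
      rw [dif_pos hpos]
      have hsh : ((n : Int) >>> (1 : Nat)) = ((n / 2 : Nat) : Int) := by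
        have := pvShift_natCast n 1
        simpa [Nat.shiftRight_one] using this
      rw [hsh, IH (n / 2) (by omega)]
      conv_rhs => rw [pvPos, dif_neg h0]
      have hmapshift : ∀ j : Int, ((pvPos (n / 2)).map (· + 1)).map (fun (k : Nat) => pvLine (j + (k : Int)))
          = (pvPos (n / 2)).map (fun (k : Nat) => pvLine (j + 1 + (k : Int))) := by
        intro j
        rw [List.map_map]
        apply List.map_congr_left
        intro k _
        show pvLine (j + ↑(k + 1)) = pvLine (j + 1 + ↑k)
        congr 1
        push_cast; ring
      have hmapshift2 : ∀ j : Int, ((pvPos (n / 2)).map (· + 1)).map (fun (k : Nat) => PySem.Int.toStr (j + (k : Int)))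
          = (pvPos (n / 2)).map (fun (k : Nat) => PySem.Int.toStr (j + 1 + (k : Int))) := by
        intro j
        rw [List.map_map]
        apply List.map_congr_left
        intro k _
        show PySem.Int.toStr (j + ↑(k + 1)) = PySem.Int.toStr (j + 1 + ↑k)
        congr 1
        push_cast; ring
      by_cases hp : n % 2 = 1
      · rw [if_pos ((pvBand_one n).mpr hp), if_pos ((pvBand_one n).mpr hp), if_pos hp,
            pvMatch_eq]
        simp only [List.map_cons, List.cons_append, List.nil_append,
          pvJoin_empty_cons, hmapshift, hmapshift2]
        simp [String.append_assoc]
      · rw [if_neg (fun h => hp ((pvBand_one n).mp h)),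
            if_neg (fun h => hp ((pvBand_one n).mp h)), if_neg hp]
        simp only [List.nil_append, hmapshift, hmapshift2]

theorem pvPosB (n : Nat) :
    (List.range (PySem.Int.bitLength (n : Int))).filter
        (fun k => decide ((n >>> k) % 2 = 1)) = pvPos n := by
  induction n using Nat.strong_induction_on with
  | _ n IH =>
    by_cases h0 : n = 0
    · subst h0
      rw [pvPos]
      simp
    · have hbl : PySem.Int.bitLength (n : Int)
          = PySem.Int.bitLength ((n / 2 : Nat) : Int) + 1 :=
        PySem.Int.bitLength_natCast (Nat.pos_of_ne_zero h0)
      rw [hbl, List.range_succ_eq_map, List.filter_cons, List.filter_map]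
      have hcomp : ((fun k => decide ((n >>> k) % 2 = 1)) ∘ Nat.succ)
          = (fun k => decide (((n / 2) >>> k) % 2 = 1)) := by
        funext k
        simp only [Function.comp]
        congr 1
        rw [show k.succ = 1 + k from by omega, Nat.shiftRight_add, Nat.shiftRight_one]
      rw [hcomp, IH (n / 2) (by omega)]
      conv_rhs => rw [pvPos, dif_neg h0]
      by_cases hp : n % 2 = 1
      · have hd : decide ((n >>> 0) % 2 = 1) = true := by simp [Nat.shiftRight_zero, hp]
        rw [if_pos hd, if_pos hp]
        rfl
      · have hd : ¬ (decide ((n >>> 0) % 2 = 1) = true) := by simp [Nat.shiftRight_zero, hp]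
        rw [if_neg hd, if_neg hp]
        rfl

-- pvPos of a doubled number: every position moves up by one
theorem pvPos_two_mul (q : Nat) : pvPos (2 * q) = (pvPos q).map (· + 1) := by
  by_cases hq : q = 0
  · subst hq; rw [pvPos]; simp
  · rw [pvPos, dif_neg (by omega)]
    have h1 : 2 * q % 2 = 0 := by omega
    have h2 : 2 * q / 2 = q := by omega
    rw [h1, h2]; simp

-- Kernighan's step: n & (n-1) clears the lowest set bit t; n ^ (n & (n-1)) = 2^t; and
-- pvPos n = t :: pvPos (n & (n-1))
theorem pvKern (n : Nat) (h : 0 < n) :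
    ∃ t : Nat, n ^^^ (n &&& (n - 1)) = 2 ^ t ∧ pvPos n = t :: pvPos (n &&& (n - 1)) := by
  induction n using Nat.strong_induction_on with
  | _ n IH =>
    by_cases hp : n % 2 = 1
    · -- odd: n = 2*q+1, lowest set bit is 0, n & (n-1) = 2*q
      obtain ⟨q, rfl⟩ : ∃ q, n = 2 * q + 1 := ⟨n / 2, by omega⟩
      have hb1 : 2 * q + 1 = Nat.bit true q := by simp [Nat.bit_val]
      have hb0 : 2 * q = Nat.bit false q := by simp [Nat.bit_val]
      have hsub : 2 * q + 1 - 1 = 2 * q := by omega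
      have hband : (2 * q + 1) &&& (2 * q + 1 - 1) = 2 * q := by
        rw [hsub]
        conv_lhs => rw [hb1, hb0, Nat.land_bit]
        simp [Nat.and_self, Nat.bit_val]
      refine ⟨0, ?_, ?_⟩
      · rw [hband]
        conv_lhs => rw [hb1, hb0, Nat.xor_bit]
        simp [Nat.bit_val]
      · rw [hband, pvPos_two_mul]
        rw [pvPos, dif_neg (by omega)]
        rw [if_pos (by omega : (2 * q + 1) % 2 = 1)]
        rw [show (2 * q + 1) / 2 = q from by omega]
        rfl
    · -- even: n = 2*q with q > 0; recurse on q
      obtain ⟨q, rfl⟩ : ∃ q, n = 2 * q := ⟨n / 2, by omega⟩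
      have hq : 0 < q := by omega
      obtain ⟨t, hxor, hpos⟩ := IH q (by omega) hq
      have hb0 : ∀ m : Nat, 2 * m = Nat.bit false m := by intro m; simp [Nat.bit_val]
      have hb1 : 2 * (q - 1) + 1 = Nat.bit true (q - 1) := by simp [Nat.bit_val]
      have hsub : 2 * q - 1 = 2 * (q - 1) + 1 := by omega
      have hband : (2 * q) &&& (2 * q - 1) = 2 * (q &&& (q - 1)) := by
        rw [hsub]
        conv_lhs => rw [hb0 q, hb1, Nat.land_bit]
        simp [Nat.bit_val]
      refine ⟨t + 1, ?_, ?_⟩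
      · rw [hband]
        conv_lhs => rw [hb0 q, hb0 (q &&& (q - 1)), Nat.xor_bit]
        simp only [bne_self_eq_false, Nat.bit_val, Bool.toNat_false, Nat.add_zero, hxor]
        rw [Nat.pow_succ]
        ring
      · rw [hband, pvPos_two_mul, pvPos_two_mul, hpos]
        simp

theorem pvBitLenPow (t : Nat) : PySem.Int.bitLength ((2 ^ t : Nat) : Int) = t + 1 := by
  induction t with
  | zero => decide
  | succ t ih =>
    have h := PySem.Int.bitLength_natCast (m := 2 ^ (t + 1)) (h := Nat.two_pow_pos _)
    rw [h, show 2 ^ (t + 1) / 2 = 2 ^ t from by rw [Nat.pow_succ]; omega, ih]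

theorem pvLoopB_spec (n : Nat) : ∀ bits : List String,
    pvLoopB (n : Int) bits = bits ++ (pvPos n).map (fun (k : Nat) => PySem.Int.toStr (k : Int)) := by
  induction n using Nat.strong_induction_on with
  | _ n IH =>
    intro bits
    rw [pvLoopB]
    by_cases h0 : n = 0
    · subst h0; rw [pvPos]; simp
    · have hpos : (0 : Int) < (n : Int) := by exact_mod_cast Nat.pos_of_ne_zero h0
      rw [dif_pos hpos]
      have hband : PySem.Int.band (n : Int) ((n : Int) - 1) = ((n &&& (n - 1) : Nat) : Int) := by
        have e2 : ((n : Int) - 1) = ((n - 1 : Nat) : Int) := by omega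
        rw [e2, PySem.Int.band_natCast]
      obtain ⟨t, hxor, hposn⟩ := pvKern n (Nat.pos_of_ne_zero h0)
      have hbx : PySem.Int.bxor (n : Int) ((n &&& (n - 1) : Nat) : Int)
          = ((2 ^ t : Nat) : Int) := by
        rw [PySem.Int.bxor_natCast, hxor]
      rw [hband, hbx, pvBitLenPow]
      have hlt : n &&& (n - 1) < n := by
        have hh : n &&& (n - 1) ≤ n - 1 := Nat.and_le_right; omega
      rw [IH (n &&& (n - 1)) hlt]
      rw [hposn]
      have ht : ((((t + 1 : Nat)) : Int) - 1) = ((t : Nat) : Int) := by push_cast; ring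
      rw [ht]
      simp

-- join of a filterMap by an ite = join of the map over the filtered list
theorem pvJoin_filterMap {α : Type} (l : List α) (c : α → Prop) [DecidablePred c] (g : α → String) :
    PySem.Str.join "" (l.filterMap (fun a => if c a then some (g a) else none))
      = PySem.Str.join "" ((l.filter (fun a => decide (c a))).map g) := by
  induction l with
  | nil => rfl
  | cons a t ih =>
    by_cases h : c a <;>
      simp [h, pvJoin_empty_cons, ih]

-- entries whose string is empty may be dropped from (or added to) the filter
theorem pvJoin_filter_sub {α : Type} (l : List α) (p q : α → Bool) (f : α → String)
    (hf : ∀ a ∈ l, q a = false → f a = "") :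
    PySem.Str.join "" ((l.filter p).map f)
      = PySem.Str.join "" ((l.filter (fun a => p a && q a)).map f) := by
  induction l with
  | nil => rfl
  | cons a t ih =>
    have ih' := ih (fun x hx => hf x (List.mem_cons_of_mem a hx))
    by_cases hp : p a = true
    · by_cases hq : q a = true
      · simp [hp, hq, pvJoin_empty_cons, ih']
      · have he : f a = "" := hf a (List.mem_cons_self ..) (by simpa using hq)
        simp [hp, hq, pvJoin_empty_cons, ih', he]
    · simp [hp, ih']

-- (range B).filter bit-set = pvPos n for any B at least bitLength n
theorem pvPos_range (n B : Nat) (hB : PySem.Int.bitLength (n : Int) ≤ B) :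
    (List.range B).filter (fun k => decide ((n >>> k) % 2 = 1)) = pvPos n := by
  induction B with
  | zero =>
    have h0 : PySem.Int.bitLength (n : Int) = 0 := by omega
    have := pvPosB n
    rw [h0] at this
    simpa using this
  | succ B IH =>
    rcases Nat.lt_or_ge B (PySem.Int.bitLength (n : Int)) with hlt | hge
    · have : PySem.Int.bitLength (n : Int) = B + 1 := by omega
      rw [← this]; exact pvPosB n
    · have hsmall : n < 2 ^ B := by
        have h1 := PySem.Int.lt_two_pow_bitLength ((n : Int))
        have h2 : ((n : Int)).natAbs = n := by simp
        calc n = ((n : Int)).natAbs := h2.symm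
          _ < 2 ^ PySem.Int.bitLength (n : Int) := h1
          _ ≤ 2 ^ B := Nat.pow_le_pow_right (by omega) hge
      have hz : (n >>> B) % 2 = 0 := by
        rw [Nat.shiftRight_eq_div_pow, Nat.div_eq_of_lt hsmall]
      rw [List.range_succ, List.filter_append]
      have : List.filter (fun k => decide ((n >>> k) % 2 = 1)) [B] = [] := by
        simp [List.filter, hz]
      rw [this, List.append_nil, IH hge]

-- bitLength fits in 32 bits on Dom
theorem pvBitLen_le_32 (n : Nat) (h : n ≤ 2147483648) : PySem.Int.bitLength (n : Int) ≤ 32 := by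
  by_contra hc
  rw [not_le] at hc
  have hne : (n : Int) ≠ 0 := by
    intro h0
    have : n = 0 := by exact_mod_cast h0
    subst this
    simp [PySem.Int.bitLength_zero] at hc
  have h1 := PySem.Int.two_pow_bitLength_le ((n : Int)) hne
  have h2 : ((n : Int)).natAbs = n := by simp
  rw [h2] at h1
  have h3 : (2 : Nat) ^ 32 ≤ 2 ^ (PySem.Int.bitLength (n : Int) - 1) :=
    Nat.pow_le_pow_right (by omega) (by omega)
  have : (2 : Nat) ^ 32 = 4294967296 := by norm_num
  omega

-- each table entry's line (reduction of the concrete dict; no string comparison involved)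
theorem pvLine_items : ∀ p ∈ pvTaintMeaning.items, pvLine p.1 = p.2 ++ "\n" := by
  intro p hp
  have hitems : pvTaintMeaning.items =
    [((0 : Int), "P/G : TAINT_PROPRIETARY_MODULE"),
     (1, "F   : TAINT_FORCED_MODULE"),
     (2, "S   : TAINT_UNSAFE_SMP(4-7), TAINT_CPU_OUT_OF_SPEC(8-9)"),
     (3, "R   : TAINT_FORCED_RMMOD"),
     (4, "M   : TAINT_MACHINE_CHECK"),
     (5, "B   : TAINT_BAD_PAGE"),
     (6, "U   : TAINT_USER"),
     (7, "D   : TAINT_DIE"),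
     (8, "A   : TAINT_OVERRIDDEN_ACPI_TABLE"),
     (9, "W   : TAINT_WARN"),
     (10, "C   : TAINT_CRAP"),
     (11, "I   : TAINT_FIRMWARE_WORKARUND"),
     (12, "O   : TAINT_OOT_MODULE"),
     (13, "E   : TAINT_UNSIGNED_MODULE"),
     (14, "L   : TAINT_SOFTLOCKUP"),
     (15, "K   : TAINT_LIVEPATCH"),
     (16, "X   : TAINT_AUX"),
     (17, "T   : TAINT_RANDSTRUCT"),
     (26, "P   : TAINT_PARTNER_SUPPORTED"),
     (27, "h/r : TAINT_SUPPORT_REMOVED")] := rfl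
  rw [hitems] at hp
  simp only [List.mem_cons, List.not_mem_nil, or_false] at hp
  rcases hp with h|h|h|h|h|h|h|h|h|h|h|h|h|h|h|h|h|h|h|h <;> (subst h; rfl)

theorem pvLine_none (j : Int) (h : (pvTaintMeaning.get? j).isSome = false) : pvLine j = "" := by
  unfold pvLine
  cases hg : pvTaintMeaning.get? j with
  | none => rfl
  | some m => rw [hg] at h; simp at h

-- ===== VERDICT (by name: the statement is the Claim_ definition above) =====
theorem translate_taint_val_spec : Claim_equal_translate_taint_val := by
  intro tv hdom hpre
  unfold Spec_translate_taint_val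
  have hbound : tv ≤ 2147483648 := by
    unfold Dom_translate_taint_val pvDomInt at hdom
    simpa using (of_decide_eq_true hdom).2
  lift tv to ℕ using hpre with n
  have hn32 : n ≤ 2147483648 := by exact_mod_cast hbound
  unfold translate_taint_val translate_taint_val_alt
  rw [pvLoopA_spec n 0 "" [], pvLoopB_spec n []]
  simp only [List.nil_append, String.empty_append, zero_add]
  refine Prod.ext ?_ rfl
  -- first components: normalize B's bit test to Nat arithmetic
  simp only [Int.shiftRight_natCast, pvBand_one]
  rw [pvJoin_filterMap]
  have hmapline : ((pvTaintMeaning.items).filter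
        (fun p => decide ((n >>> p.1.toNat) % 2 = 1))).map (fun p => p.2 ++ "\n")
      = ((pvTaintMeaning.items).filter
        (fun p => decide ((n >>> p.1.toNat) % 2 = 1))).map (fun p => pvLine p.1) := by
    apply List.map_congr_left
    intro p hp
    exact (pvLine_items p (List.mem_filter.mp hp).1).symm
  rw [hmapline]
  rw [← pvPos_range n 32 (pvBitLen_le_32 n hn32)]
  have hcast : ((List.range 32).filter (fun k => decide ((n >>> k) % 2 = 1))).map
        (fun (k : Nat) => pvLine (k : Int))
      = (((List.range 32).map (fun (k : Nat) => (k : Int))).filter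
          (fun j => decide ((n >>> j.toNat) % 2 = 1))).map pvLine := by
    rw [List.filter_map, List.map_map]
    have hfc : (List.range 32).filter
          ((fun j : Int => decide ((n >>> j.toNat) % 2 = 1)) ∘ (fun k : Nat => (k : Int)))
        = (List.range 32).filter (fun k => decide ((n >>> k) % 2 = 1)) := by
      apply List.filter_congr
      intro k _
      simp
    rw [hfc]
    rfl
  rw [hcast]
  rw [pvJoin_filter_sub (((List.range 32).map (fun (k : Nat) => (k : Int))))
      (fun j => decide ((n >>> j.toNat) % 2 = 1))
      (fun j => (pvTaintMeaning.get? j).isSome) pvLine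
      (fun a _ h => pvLine_none a h)]
  have hkeys : ((List.range 32).map (fun (k : Nat) => (k : Int))).filter
        (fun j => (pvTaintMeaning.get? j).isSome)
      = (pvTaintMeaning.items).map Prod.fst := by decide
  rw [← List.filter_filter, hkeys, List.filter_map, List.map_map]
  rfl
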